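-- pv_equiv track=rewrite | github.com/KiplingStopa/LAGCC_scorecard | scorecard.py | solid_holes
-- ===== SOURCE A (Python) =====
-- def solid_holes(list):
--     # This function takes as input the list of average scores to par and creates a list of 3 or more solid holes,
--     # which does not include your best hole on the course.
--     sort = sorted(list)
--     if len(sort) < 4:
--         raise ValueError("Insufficient Number of Holes")
--     x = 0
--     final = []
--     for score in sort:
--         if not (isinstance(score, float) or isinstance(score, int)):
--             raise ValueError("Only Accepts Number Values")
--         if x == 0:
--             x += 1
--             continue
--         if x < 4:
--             x += 1
--             final.append(score)
--         elif score in final: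
--             final.append(score)
--     return final
-- ===== SOURCE B (Python) =====
-- def solid_holes(list):
--     sort = sorted(list)
--     if len(sort) < 4:
--         raise ValueError("Insufficient Number of Holes")
--     for score in sort:
--         if not (isinstance(score, float) or isinstance(score, int)):
--             raise ValueError("Only Accepts Number Values")
--     # After sorting, every element past index 3 is >= sort[3], so the only later
--     # elements equal to one of the three solid holes are copies of sort[3]:
--     # the result is sort[1:4] followed by that many copies, computed by counting.
--     t = sort[3]
--     extra = sort.count(t) - sort[:4].count(t)
--     return sort[1:4] + [t] * extra
-- ===== Notes on version B (the rewrite author's own statement) =====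
-- stated objective: alternative
-- what changed: Replaces A's stateful counter/skip/membership-append loop with a closed-form construction: since the list is sorted, the only later duplicates of the three solid holes are copies of sort[3], so B returns sort[1:4] plus count-many replicated copies, with no per-element membership test or accumulation loop.
import Mathlib
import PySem

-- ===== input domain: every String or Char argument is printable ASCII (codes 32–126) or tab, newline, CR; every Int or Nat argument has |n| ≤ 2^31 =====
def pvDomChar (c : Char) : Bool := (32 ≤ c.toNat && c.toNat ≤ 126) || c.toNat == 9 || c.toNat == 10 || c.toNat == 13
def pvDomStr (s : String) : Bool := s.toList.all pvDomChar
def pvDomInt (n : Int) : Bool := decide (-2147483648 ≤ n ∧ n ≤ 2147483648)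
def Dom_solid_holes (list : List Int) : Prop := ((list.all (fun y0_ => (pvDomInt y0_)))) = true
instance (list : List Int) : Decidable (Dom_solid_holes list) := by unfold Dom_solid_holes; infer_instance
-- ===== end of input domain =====

-- B replaces A's counter/skip/membership-append loop with a closed form: on the sorted list the
-- only later duplicates of the solid holes are copies of sort[3], so B returns sort[1:4] plus
-- that many replicated copies, computed by counting (objective: alternative).

-- ===== PORT A =====
-- A's loop step: state (x, final); branches in A's order.
def solidHolesStep (st : Int × List Int) (score : Int) : Int × List Int :=
  if st.1 == 0 then (st.1 + 1, st.2)
  else if st.1 < 4 then (st.1 + 1, st.2 ++ [score])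
  else if score ∈ st.2 then (st.1, st.2 ++ [score])
  else st

def solid_holes (list : List Int) : List Int :=
  let sort := PySem.List.sorted list (fun x => x) false
  -- len(sort) < 4 raises ValueError: excluded by Pre_solid_holes
  (sort.foldl solidHolesStep (0, [])).2

-- ===== PORT B =====
def solid_holes_alt (list : List Int) : List Int :=
  let sort := PySem.List.sorted list (fun x => x) false
  -- len(sort) < 4 raises ValueError (and sort[3] would raise IndexError): excluded by Pre_solid_holes
  match PySem.List.pyGet? sort 3 with
  | none => []
  | some t =>
    let extra := PySem.List.count sort t - PySem.List.count (PySem.List.slice sort none (some 4)) t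
    PySem.List.slice sort (some 1) (some 4) ++ List.replicate extra t

-- ===== PRECONDITION & SPEC =====
-- A raises ValueError when fewer than 4 holes are given; isinstance checks always pass on Int.
def Pre_solid_holes (list : List Int) : Prop := 4 ≤ list.length
instance (list : List Int) : Decidable (Pre_solid_holes list) := by unfold Pre_solid_holes; infer_instance
def pvWitness_solid_holes : List Int := [3, 1, 2, 2, 1]

def Spec_solid_holes (list : List Int) (out : List Int) : Prop := out = solid_holes_alt list
instance (list : List Int) (out : List Int) : Decidable (Spec_solid_holes list out) := by unfold Spec_solid_holes; infer_instance

-- ===== CLAIM (what is proved, stated in full; the proofs are below) =====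
def Claim_equal_solid_holes : Prop := ∀ (list : List Int), Dom_solid_holes list → Pre_solid_holes list → Spec_solid_holes list (solid_holes list)

-- ===== LEMMAS AND PROOFS =====

-- Once x = 4, A's loop only appends scores already in final.
lemma solidHolesStep_four (acc : List Int) (e : Int) :
    solidHolesStep (4, acc) e = if e ∈ acc then (4, acc ++ [e]) else (4, acc) := by
  simp [solidHolesStep]

lemma solidHoles_foldl_four (t acc solid : List Int)
    (h : ∀ v, v ∈ acc ↔ v ∈ solid) :
    t.foldl solidHolesStep (4, acc) = (4, acc ++ t.filter (fun s => decide (s ∈ solid))) := by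
  induction t generalizing acc with
  | nil => simp
  | cons e t ih =>
    rw [List.foldl_cons, solidHolesStep_four, List.filter_cons]
    by_cases he : e ∈ acc
    · have hes : e ∈ solid := (h e).mp he
      rw [if_pos he, ih (acc ++ [e]) (by intro v; simp [h v]; intro hv; subst hv; exact hes)]
      simp [hes]
    · have hes : e ∉ solid := fun hs => he ((h e).mpr hs)
      rw [if_neg he, ih acc h]
      simp [hes]

-- On a tail whose elements are all ≥ d, membership in [b, c, d] (b ≤ c ≤ d) means equality with d.
lemma filter_mem_eq_replicate_count (b c d : Int) (t : List Int)
    (hbc : b ≤ c) (hcd : c ≤ d) (hd : ∀ x ∈ t, d ≤ x) :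
    t.filter (fun s => decide (s ∈ [b, c, d])) = List.replicate (t.count d) d := by
  have h1 : t.filter (fun s => decide (s ∈ [b, c, d])) = t.filter (fun s => s == d) := by
    apply List.filter_congr
    intro x hx
    have hdx : d ≤ x := hd x hx
    simp only [List.mem_cons, List.not_mem_nil, or_false]
    have : (x = b ∨ x = c ∨ x = d) ↔ x = d := by
      constructor
      · rintro (rfl | rfl | rfl) <;> omega
      · rintro rfl; right; right; rfl
    rw [Bool.eq_iff_iff]; simp [this]
  rw [h1]
  exact List.filter_beq d

theorem solid_holes_spec : Claim_equal_solid_holes := by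
  intro list _ hpre
  unfold Spec_solid_holes solid_holes solid_holes_alt
  set sort := PySem.List.sorted list (fun x => x) false with hs
  have hlen : 4 ≤ sort.length := by
    rw [hs, PySem.List.length_sorted]; exact hpre
  have hpw : sort.Pairwise (fun a b => a ≤ b) := PySem.List.sorted_pairwise list _
  match hm : sort, hpw with
  | [], _ | [_], _ | [_, _], _ | [_, _, _], _ => simp at hlen
  | a :: b :: c :: d :: t, hpw =>
    have hbc : b ≤ c := by
      rcases List.pairwise_cons.mp hpw with ⟨_, h2⟩
      rcases List.pairwise_cons.mp h2 with ⟨h3, _⟩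
      exact h3 c (by simp)
    have hcd : c ≤ d := by
      rcases List.pairwise_cons.mp hpw with ⟨_, h2⟩
      rcases List.pairwise_cons.mp h2 with ⟨_, h3⟩
      rcases List.pairwise_cons.mp h3 with ⟨h4, _⟩
      exact h4 d (by simp)
    have hdt : ∀ x ∈ t, d ≤ x := by
      rcases List.pairwise_cons.mp hpw with ⟨_, h2⟩
      rcases List.pairwise_cons.mp h2 with ⟨_, h3⟩
      rcases List.pairwise_cons.mp h3 with ⟨_, h4⟩
      rcases List.pairwise_cons.mp h4 with ⟨h5, _⟩
      exact h5
    -- A's first four iterations, then the filter characterisation of the rest of the loop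
    have hA : (List.foldl solidHolesStep (0, []) (a :: b :: c :: d :: t)).2
        = b :: c :: d :: t.filter (fun s => decide (s ∈ [b, c, d])) := by
      simp only [List.foldl_cons]
      norm_num [solidHolesStep]
      rw [solidHoles_foldl_four t [b, c, d] [b, c, d] (fun v => Iff.rfl)]
      simp
    -- B's pieces as concrete values
    have hg : PySem.List.pyGet? (a :: b :: c :: d :: t) 3 = some d := by
      simp [PySem.List.pyGet?, PySem.List.pyIdx?]
      rw [if_pos (by omega)]
      simp
    have h14 : PySem.List.slice (a :: b :: c :: d :: t) (some 1) (some 4) = [b, c, d] := by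
      rw [show ((1 : Int)) = ((1 : Nat) : Int) by norm_num,
          show ((4 : Int)) = ((4 : Nat) : Int) by norm_num,
          PySem.List.slice_natCast]
      simp
    have h04 : PySem.List.slice (a :: b :: c :: d :: t) none (some 4) = [a, b, c, d] := by
      rw [show ((4 : Int)) = ((4 : Nat) : Int) by norm_num, PySem.List.slice_to_natCast]
      simp
    have hcnt : PySem.List.count (a :: b :: c :: d :: t) d
        - PySem.List.count [a, b, c, d] d = t.count d := by
      simp [PySem.List.count, List.count_cons]
      omega
    rw [hA]
    simp only [hg, h14, h04, hcnt]
    rw [filter_mem_eq_replicate_count b c d t hbc hcd hdt]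
    rfl
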